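-- pv_equiv track=rewrite | github.com/Ryuya-dot-com/MFRM_Python_Application | streamlit_app.py | guess_col
-- ===== SOURCE A (Python) =====
-- def guess_col(cols, patterns, fallback=0):
--     if not cols:
--         return None
--     lowered = [c.lower() for c in cols]
--     for pattern in patterns:
--         for idx, name in enumerate(lowered):
--             if pattern in name:
--                 return cols[idx]
--     return cols[min(fallback, len(cols) - 1)]
-- ===== SOURCE B (Python) =====
-- def guess_col(cols, patterns, fallback=0):
--     # Column-outer scan keeping the best (lowest) pattern priority seen so far;
--     # only patterns with a strictly smaller index than the current best are tried,
--     # so the earliest column wins ties, matching A's pattern-outer scan.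
--     if not cols:
--         return None
--     best_col = None
--     best_pri = len(patterns)
--     for col in cols:
--         name = col.lower()
--         for j, p in enumerate(patterns[:best_pri]):
--             if p in name:
--                 best_pri = j
--                 best_col = col
--                 break
--     if best_col is not None:
--         return best_col
--     return cols[min(fallback, len(cols) - 1)]
-- ===== Notes on version B (the rewrite author's own statement) =====
-- stated objective: alternative
-- what changed: Loop order is swapped: instead of A's pattern-outer rescans of all columns, B scans columns once, computes each column's first matching pattern index among only the patterns better than the current best, and keeps the earliest column with the smallest priority.
-- outside the precondition, e.g. on guess_col(['a'], ['x'], -5): A raises IndexError, B raises IndexError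
import Mathlib
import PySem

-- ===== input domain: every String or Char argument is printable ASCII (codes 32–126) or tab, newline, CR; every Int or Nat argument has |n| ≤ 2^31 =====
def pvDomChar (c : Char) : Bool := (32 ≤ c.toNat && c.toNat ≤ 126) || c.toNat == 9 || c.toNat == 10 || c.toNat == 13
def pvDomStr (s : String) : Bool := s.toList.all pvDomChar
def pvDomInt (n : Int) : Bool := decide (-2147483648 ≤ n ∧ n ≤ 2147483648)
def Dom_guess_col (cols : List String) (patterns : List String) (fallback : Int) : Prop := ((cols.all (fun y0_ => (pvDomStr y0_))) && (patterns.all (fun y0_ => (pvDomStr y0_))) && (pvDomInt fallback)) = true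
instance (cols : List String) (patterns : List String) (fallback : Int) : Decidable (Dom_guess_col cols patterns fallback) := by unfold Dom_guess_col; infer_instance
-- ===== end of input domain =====

-- B swaps the loop order: one pass over columns keeping the earliest column with the
-- strictly smallest first-matching-pattern index, instead of A's pattern-outer rescans.


-- ===== PORT A =====
-- inner loop: 'for idx, name in enumerate(lowered): if pattern in name: return cols[idx]'
def innerA (cols : List String) (pattern : String) : Nat → List String → Option String
  | _, [] => none
  | idx, name :: rest =>
    if PySem.Str.isIn pattern name then PySem.List.pyGet? cols (idx : Int)
    else innerA cols pattern (idx + 1) rest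

-- outer loop: 'for pattern in patterns: …'
def outerA (cols lowered : List String) : List String → Option String
  | [] => none
  | p :: ps =>
    match innerA cols p 0 lowered with
    | some r => some r
    | none => outerA cols lowered ps

def guess_col (cols : List String) (patterns : List String) (fallback : Int) : Option String :=
  if cols = [] then none
  else
    let lowered := cols.map PySem.Str.lower
    match outerA cols lowered patterns with
    | some r => some r
    | none => PySem.List.pyGet? cols (min fallback ((cols.length : Int) - 1))

-- ===== PORT B =====
-- 'for j, p in enumerate(patterns): if p in name: … break'
def firstMatchB (name : String) : Nat → List String → Option Nat
  | _, [] => none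
  | j, p :: ps => if PySem.Str.isIn p name then some j else firstMatchB name (j + 1) ps

-- body of 'for col in cols: …'
def stepB (patterns : List String) (st : Option String × Nat) (col : String) : Option String × Nat :=
  match firstMatchB (PySem.Str.lower col) 0 (patterns.take st.2) with
  | some j => (some col, j)
  | none => st

def guess_col_alt (cols : List String) (patterns : List String) (fallback : Int) : Option String :=
  if cols = [] then none
  else
    match (cols.foldl (stepB patterns) (none, patterns.length)).1 with
    | some c => some c
    | none => PySem.List.pyGet? cols (min fallback ((cols.length : Int) - 1))

-- ===== PRECONDITION & SPEC =====
-- Pre_ excludes exactly the inputs where A raises IndexError on the fallback lookup: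
-- cols nonempty, no pattern occurs in any lowered column, and min(fallback, len-1) < -len(cols).
def Pre_guess_col (cols : List String) (patterns : List String) (fallback : Int) : Prop :=
  cols = [] ∨ (-(cols.length : Int) ≤ fallback) ∨
    (∃ p ∈ patterns, ∃ c ∈ cols, PySem.Str.isIn p (PySem.Str.lower c) = true)
instance (cols : List String) (patterns : List String) (fallback : Int) : Decidable (Pre_guess_col cols patterns fallback) := by unfold Pre_guess_col; infer_instance

def pvWitness_guess_col : List String × List String × Int := (["Person A", "Item"], ["item"], 0)

def Spec_guess_col (cols : List String) (patterns : List String) (fallback : Int) (out : Option String) : Prop := out = guess_col_alt cols patterns fallback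
instance (cols : List String) (patterns : List String) (fallback : Int) (out : Option String) : Decidable (Spec_guess_col cols patterns fallback out) := by unfold Spec_guess_col; infer_instance

-- ===== CLAIM (what is proved, stated in full; the proofs are below) =====
def Claim_equal_guess_col : Prop := ∀ (cols : List String) (patterns : List String) (fallback : Int), Dom_guess_col cols patterns fallback → Pre_guess_col cols patterns fallback → Spec_guess_col cols patterns fallback (guess_col cols patterns fallback)

-- ===== LEMMAS AND PROOFS =====

-- first column (value) whose lowered form contains p
def firstCont (p : String) : List String → Option String
  | [] => none
  | c :: cs => if PySem.Str.isIn p (PySem.Str.lower c) then some c else firstCont p cs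

-- earliest column with the smallest first-matching-pattern index, with that index
def sel (patterns : List String) : List String → Option (String × Nat)
  | [] => none
  | c :: cs =>
    match firstMatchB (PySem.Str.lower c) 0 patterns, sel patterns cs with
    | none, r => r
    | some j, none => some (c, j)
    | some j, some (c', j') => if j' < j then some (c', j') else some (c, j)

theorem firstMatchB_shift (name : String) (ps : List String) :
    ∀ j : Nat, firstMatchB name j ps = (firstMatchB name 0 ps).map (· + j) := by
  induction ps with
  | nil => intro j; rfl
  | cons p ps ih =>
    intro j
    by_cases h : PySem.Str.isIn p name = true
    · simp only [firstMatchB]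
      rw [if_pos h, if_pos h]
      simp
    · simp only [firstMatchB]
      rw [if_neg h, if_neg h, ih (j + 1), ih 1, Option.map_map]
      cases firstMatchB name 0 ps with
      | none => rfl
      | some a => simp; omega

theorem firstMatchB_lt (name : String) (ps : List String) :
    ∀ j, firstMatchB name 0 ps = some j → j < ps.length := by
  induction ps with
  | nil => intro j h; simp [firstMatchB] at h
  | cons p ps ih =>
    intro j h
    simp only [firstMatchB] at h
    by_cases hc : PySem.Str.isIn p name = true
    · rw [if_pos hc] at h; injection h with h; subst h; simp
    · rw [if_neg hc, firstMatchB_shift] at h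
      cases hfm : firstMatchB name 0 ps with
      | none => rw [hfm] at h; simp at h
      | some k =>
        rw [hfm] at h; simp at h
        have := ih k hfm
        simp only [List.length_cons]; omega

theorem innerA_eq_firstCont (p : String) :
    ∀ (cs pre : List String),
      innerA (pre ++ cs) p pre.length (cs.map PySem.Str.lower) = firstCont p cs := by
  intro cs
  induction cs with
  | nil => intro pre; rfl
  | cons c cs ih =>
    intro pre
    simp only [List.map_cons, innerA, firstCont]
    by_cases h : PySem.Str.isIn p (PySem.Str.lower c) = true
    · rw [if_pos h, if_pos h, PySem.List.pyGet?_append_length]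
    · rw [if_neg h, if_neg h]
      have := ih (pre ++ [c])
      simpa [List.append_assoc] using this

theorem sel_nil_patterns : ∀ cs, sel [] cs = none := by
  intro cs
  induction cs with
  | nil => rfl
  | cons c cs ih => simp [sel, firstMatchB, ih]

theorem sel_cons_of_found (p : String) (ps : List String) :
    ∀ cs c, firstCont p cs = some c → sel (p :: ps) cs = some (c, 0) := by
  intro cs
  induction cs with
  | nil => intro c h; simp [firstCont] at h
  | cons c0 cs ih =>
    intro c h
    simp only [firstCont] at h
    by_cases hc : PySem.Str.isIn p (PySem.Str.lower c0) = true
    · rw [if_pos hc] at h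
      injection h with h; subst h
      simp only [sel, firstMatchB]
      rw [if_pos hc]
      cases hs : sel (p :: ps) cs with
      | none => rfl
      | some r => cases r with | mk c' j' => simp
    · rw [if_neg hc] at h
      have hrec := ih c h
      simp only [sel, hrec, firstMatchB]
      rw [if_neg hc, firstMatchB_shift]
      cases hfm : firstMatchB (PySem.Str.lower c0) 0 ps with
      | none => simp
      | some k => simp

theorem sel_cons_of_none (p : String) (ps : List String) :
    ∀ cs, firstCont p cs = none →
      sel (p :: ps) cs = (sel ps cs).map (fun r => (r.1, r.2 + 1)) := by
  intro cs
  induction cs with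
  | nil => intro _; rfl
  | cons c0 cs ih =>
    intro h
    simp only [firstCont] at h
    by_cases hc : PySem.Str.isIn p (PySem.Str.lower c0) = true
    · rw [if_pos hc] at h; exact absurd h (by simp)
    · rw [if_neg hc] at h
      have hrec := ih h
      simp only [sel, hrec, firstMatchB]
      rw [if_neg hc, firstMatchB_shift]
      cases firstMatchB (PySem.Str.lower c0) 0 ps with
      | none =>
        cases sel ps cs with
        | none => rfl
        | some r => rfl
      | some k =>
        simp only [Option.map_some]
        cases sel ps cs with
        | none => simp
        | some r =>
          cases r with | mk c' j' =>
          simp only [Option.map_some]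
          split_ifs <;> first | rfl | omega

theorem firstMatchB_take (name : String) (ps : List String) :
    ∀ pri : Nat, firstMatchB name 0 (ps.take pri) =
      match firstMatchB name 0 ps with
      | some j => if j < pri then some j else none
      | none => none := by
  induction ps with
  | nil =>
    intro pri
    rw [List.take_nil]
    simp [firstMatchB]
  | cons p ps ih =>
    intro pri
    cases pri with
    | zero =>
      cases firstMatchB name 0 (p :: ps) with
      | none => rfl
      | some j => simp [firstMatchB]
    | succ pri =>
      simp only [List.take_succ_cons, firstMatchB]
      by_cases h : PySem.Str.isIn p name = true
      · rw [if_pos h, if_pos h]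
        simp
      · rw [if_neg h, if_neg h, firstMatchB_shift name (List.take pri ps) (0 + 1),
            firstMatchB_shift name ps (0 + 1), ih pri]
        cases firstMatchB name 0 ps with
        | none => rfl
        | some j =>
          simp only [Option.map_some]
          split_ifs <;> first | rfl | omega

theorem stepB_eq (patterns : List String) (st : Option String × Nat) (col : String) :
    stepB patterns st col =
      match firstMatchB (PySem.Str.lower col) 0 patterns with
      | some j => if j < st.2 then (some col, j) else st
      | none => st := by
  unfold stepB
  rw [firstMatchB_take]
  cases firstMatchB (PySem.Str.lower col) 0 patterns with
  | none => rfl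
  | some j =>
    dsimp only
    by_cases hj : j < st.2
    · rw [if_pos hj, if_pos hj]
    · rw [if_neg hj, if_neg hj]

theorem outerA_eq_sel (cols : List String) :
    ∀ ps, outerA cols (cols.map PySem.Str.lower) ps = (sel ps cols).map Prod.fst := by
  intro ps
  induction ps with
  | nil => simp [outerA, sel_nil_patterns]
  | cons p ps ih =>
    simp only [outerA]
    have hin : innerA cols p 0 (cols.map PySem.Str.lower) = firstCont p cols := by
      have := innerA_eq_firstCont p cols []
      simpa using this
    rw [hin]
    cases hfc : firstCont p cols with
    | some c => rw [sel_cons_of_found p ps cols c hfc]; rfl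
    | none =>
      rw [sel_cons_of_none p ps cols hfc, ih]
      cases sel ps cols with
      | none => rfl
      | some r => rfl

theorem sel_key (patterns : List String) :
    ∀ cs c j, sel patterns cs = some (c, j) → j < patterns.length := by
  intro cs
  induction cs with
  | nil => intro c j h; simp [sel] at h
  | cons c0 cs ih =>
    intro c j h
    simp only [sel] at h
    cases hfm : firstMatchB (PySem.Str.lower c0) 0 patterns with
    | none => rw [hfm] at h; exact ih c j h
    | some k =>
      rw [hfm] at h
      cases hs : sel patterns cs with
      | none =>
        rw [hs] at h
        simp only [Option.some.injEq, Prod.mk.injEq] at h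
        obtain ⟨-, hj⟩ := h
        subst hj; exact firstMatchB_lt _ _ _ hfm
      | some r =>
        cases r with | mk c' j' =>
        rw [hs] at h
        by_cases hlt : j' < k
        · simp only [if_pos hlt, Option.some.injEq, Prod.mk.injEq] at h
          obtain ⟨-, hj⟩ := h
          subst hj; exact ih c' j' hs
        · simp only [if_neg hlt, Option.some.injEq, Prod.mk.injEq] at h
          obtain ⟨-, hj⟩ := h
          subst hj; exact firstMatchB_lt _ _ _ hfm

theorem foldB_eq_sel (patterns : List String) :
    ∀ (cs : List String) (best : Option String) (pri : Nat),
      cs.foldl (stepB patterns) (best, pri) =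
        match sel patterns cs with
        | none => (best, pri)
        | some (c, j) => if j < pri then (some c, j) else (best, pri) := by
  intro cs
  induction cs with
  | nil => intro best pri; rfl
  | cons c0 cs ih =>
    intro best pri
    simp only [List.foldl_cons, stepB_eq, sel]
    cases hfm : firstMatchB (PySem.Str.lower c0) 0 patterns with
    | none =>
      simp only [ih]
    | some k =>
      dsimp only
      by_cases hk : k < pri
      · rw [if_pos hk]
        simp only [ih]
        cases sel patterns cs with
        | none => simp [hk]
        | some r =>
          cases r with | mk c' j' =>
          by_cases hlt : j' < k
          · simp [hlt, show j' < pri from by omega]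
          · simp [hlt, hk]
      · rw [if_neg hk]
        simp only [ih]
        cases sel patterns cs with
        | none => simp [hk]
        | some r =>
          cases r with | mk c' j' =>
          by_cases hlt : j' < k
          · simp [hlt]
          · simp [hlt, show ¬ j' < pri from by omega, hk]

theorem guess_col_eq (cols patterns : List String) (fallback : Int) :
    guess_col cols patterns fallback = guess_col_alt cols patterns fallback := by
  unfold guess_col guess_col_alt
  by_cases hnil : cols = []
  · simp [hnil]
  · rw [if_neg hnil, if_neg hnil]
    simp only [outerA_eq_sel, foldB_eq_sel]
    cases hs : sel patterns cols with
    | none => rfl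
    | some r =>
      cases r with | mk c j =>
      have := sel_key patterns cols c j hs
      simp [this]

-- ===== VERDICT (by name: the statement is the Claim_ definition above) =====
theorem guess_col_spec : Claim_equal_guess_col := by
  intro cols patterns fallback _ _
  unfold Spec_guess_col
  exact guess_col_eq cols patterns fallback
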